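-- pv_equiv track=rewrite | github.com/windprak/steuerllm | Data-Generation/Conversation-Generation/src/orchestrator.py | create_work_assignments
-- ===== SOURCE A (Python) =====
-- from itertools import cycle
-- from typing import List, Tuple
--
-- def create_work_assignments(
--     chunk_groups: List[List[str]],
--     endpoints: List[str],
--     workers_per_endpoint: int
-- ) -> List[Tuple[str, List[str]]]:
--     """Create work assignments distributing chunks across endpoints."""
--     all_slots = []
--     for endpoint in endpoints:
--         all_slots.extend([endpoint] * workers_per_endpoint)
--
--     assignments = []
--     for chunks, endpoint in zip(chunk_groups, cycle(all_slots)):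
--         if chunks:
--             assignments.append((endpoint, chunks))
--
--     return assignments
-- ===== SOURCE B (Python) =====
-- def create_work_assignments(chunk_groups, endpoints, workers_per_endpoint):
--     """Create work assignments distributing chunks across endpoints."""
--     total = len(endpoints) * max(workers_per_endpoint, 0)
--     if total == 0:
--         return []
--     return [(endpoints[(i % total) // workers_per_endpoint], chunks)
--             for i, chunks in enumerate(chunk_groups) if chunks]
-- ===== Notes on version B (the rewrite author's own statement) =====
-- stated objective: faster
-- what changed: Replaces the materialized all_slots list and itertools.cycle with modular index arithmetic over the original endpoints list in a single comprehension.
import Mathlib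
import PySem

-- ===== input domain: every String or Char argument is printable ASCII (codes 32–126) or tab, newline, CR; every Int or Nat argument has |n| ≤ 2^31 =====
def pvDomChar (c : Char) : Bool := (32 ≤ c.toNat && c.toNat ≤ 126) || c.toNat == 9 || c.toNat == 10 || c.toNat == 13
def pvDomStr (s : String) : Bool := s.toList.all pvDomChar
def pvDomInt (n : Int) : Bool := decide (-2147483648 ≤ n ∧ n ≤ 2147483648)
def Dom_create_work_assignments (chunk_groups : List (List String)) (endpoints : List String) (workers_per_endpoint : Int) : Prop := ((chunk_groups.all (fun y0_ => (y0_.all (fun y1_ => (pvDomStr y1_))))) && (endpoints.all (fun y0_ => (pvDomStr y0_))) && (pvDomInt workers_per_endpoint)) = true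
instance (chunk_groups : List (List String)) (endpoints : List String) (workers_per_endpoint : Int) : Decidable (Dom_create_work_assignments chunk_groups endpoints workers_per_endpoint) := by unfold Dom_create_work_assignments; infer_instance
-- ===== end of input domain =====

-- B replaces A's materialized slot list and itertools.cycle by modular index
-- arithmetic over the endpoints list, avoiding the O(endpoints*workers) slot list; same results.

-- ===== PORT A =====
-- all_slots.extend([endpoint] * workers_per_endpoint); zip with cycle(all_slots)
-- pairs chunk i with all_slots[i % len(all_slots)], and stops immediately when
-- all_slots is empty (cycle of the empty list yields nothing).
def create_work_assignments (chunk_groups : List (List String)) (endpoints : List String) (workers_per_endpoint : Int) : List (String × List String) :=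
  let all_slots : List String :=
    endpoints.foldl (fun acc e => acc ++ List.replicate workers_per_endpoint.toNat e) []
  if all_slots.isEmpty then []
  else
    (PySem.List.enumerate chunk_groups).foldl
      (fun acc p =>
        if p.2 ≠ [] then
          acc ++ [(all_slots.getD (p.1.toNat % all_slots.length) "", p.2)]
        else acc) []

-- ===== PORT B =====
def create_work_assignments_alt (chunk_groups : List (List String)) (endpoints : List String) (workers_per_endpoint : Int) : List (String × List String) :=
  let total : Nat := endpoints.length * workers_per_endpoint.toNat
  if total = 0 then []
  else
    ((PySem.List.enumerate chunk_groups).filter (fun p => p.2 ≠ [])).map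
      (fun p => (endpoints.getD ((p.1.toNat % total) / workers_per_endpoint.toNat) "", p.2))

-- ===== PRECONDITION & SPEC =====
def Spec_create_work_assignments (chunk_groups : List (List String)) (endpoints : List String) (workers_per_endpoint : Int) (out : List (String × List String)) : Prop := out = create_work_assignments_alt chunk_groups endpoints workers_per_endpoint
instance (chunk_groups : List (List String)) (endpoints : List String) (workers_per_endpoint : Int) (out : List (String × List String)) : Decidable (Spec_create_work_assignments chunk_groups endpoints workers_per_endpoint out) := by unfold Spec_create_work_assignments; infer_instance

-- ===== CLAIM (what is proved, stated in full; the proofs are below) =====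
def Claim_equal_create_work_assignments : Prop := ∀ (chunk_groups : List (List String)) (endpoints : List String) (workers_per_endpoint : Int), Dom_create_work_assignments chunk_groups endpoints workers_per_endpoint → Spec_create_work_assignments chunk_groups endpoints workers_per_endpoint (create_work_assignments chunk_groups endpoints workers_per_endpoint)

-- ===== LEMMAS AND PROOFS =====

theorem length_flatMap_replicate (xs : List String) (w : Nat) :
    (xs.flatMap (List.replicate w)).length = xs.length * w := by
  induction xs with
  | nil => simp
  | cons x xs ih => simp [List.flatMap_cons, ih]; ring

theorem getD_flatMap_replicate (xs : List String) (w : Nat) (k : Nat) (d : String)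
    (hk : k < xs.length * w) :
    (xs.flatMap (List.replicate w)).getD k d = xs.getD (k / w) d := by
  induction xs generalizing k with
  | nil => simp at hk
  | cons x xs ih =>
    have hw : 0 < w := by
      rcases Nat.eq_zero_or_pos w with h | h
      · simp [h] at hk
      · exact h
    simp only [List.flatMap_cons]
    by_cases hkw : k < w
    · have h0 : k / w = 0 := Nat.div_eq_of_lt hkw
      have hlt : k < (List.replicate w x).length := by simpa using hkw
      rw [List.getD_eq_getElem?_getD, List.getElem?_append_left hlt]
      simp [h0, hkw]
    · have hkw' : w ≤ k := Nat.le_of_not_lt hkw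
      have hlen : (List.replicate w x).length ≤ k := by simpa using hkw'
      rw [List.getD_eq_getElem?_getD, List.getElem?_append_right hlen]
      simp only [List.length_replicate]
      have hk' : k - w < xs.length * w := by
        have h2 : k < xs.length * w + w := by
          simp only [List.length_cons, Nat.succ_mul] at hk
          exact hk
        omega
      have ihh := ih (k - w) hk'
      rw [List.getD_eq_getElem?_getD] at ihh
      rw [ihh, Nat.div_eq_sub_div hw hkw']
      simp

theorem create_work_assignments_spec_aux (chunk_groups : List (List String)) (endpoints : List String) (workers_per_endpoint : Int) :
    create_work_assignments chunk_groups endpoints workers_per_endpoint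
      = create_work_assignments_alt chunk_groups endpoints workers_per_endpoint := by
  unfold create_work_assignments create_work_assignments_alt
  set w : Nat := workers_per_endpoint.toNat with hw
  have hslots : endpoints.foldl (fun acc e => acc ++ List.replicate w e) []
      = endpoints.flatMap (List.replicate w) :=
    by simpa using PySem.List.foldl_append_eq_flatMap (List.replicate w) endpoints []
  rw [hslots]
  have hlen := length_flatMap_replicate endpoints w
  by_cases h0 : endpoints.length * w = 0
  · have he : (endpoints.flatMap (List.replicate w)).isEmpty = true := by
      simp [List.isEmpty_iff, List.eq_nil_iff_length_eq_zero, hlen, h0]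
    simp [he, h0]
  · rw [if_neg h0]
    rw [if_neg (by simp [List.isEmpty_iff, List.eq_nil_iff_length_eq_zero, hlen, h0])]
    rw [PySem.List.foldl_append_ite (fun (p : Int × List String) => p.2 ≠ [])
        (fun p => ((endpoints.flatMap (List.replicate w)).getD
          (p.1.toNat % (endpoints.flatMap (List.replicate w)).length) "", p.2))]
    simp only [List.nil_append]
    apply List.map_congr_left
    intro p _
    have hk : p.1.toNat % (endpoints.length * w) < endpoints.length * w :=
      Nat.mod_lt _ (Nat.pos_of_ne_zero h0)
    rw [hlen, getD_flatMap_replicate endpoints w _ "" hk]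

-- ===== VERDICT (by name: the statement is the Claim_ definition above) =====
theorem create_work_assignments_spec : Claim_equal_create_work_assignments := by
  intro cg eps w _
  unfold Spec_create_work_assignments
  exact create_work_assignments_spec_aux cg eps w
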